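-- pv_equiv track=rewrite | github.com/may4everL/ESLR_project_app_TRB | utils.py | modify_points
-- ===== SOURCE A (Python) =====
-- def modify_points(Z, max):
--     modified_Z = []
--     for ele in Z:
--         if ele > max:
--             modified_Z.append(max)
--         else:
--             modified_Z.append(ele)
--             max = ele
--     return modified_Z
-- ===== SOURCE B (Python) =====
-- def modify_points(Z, max):
--     # Divide and conquer: clamp the left half under the initial cap; the last
--     # clamped left value is exactly the cap for the right half.
--     if len(Z) <= 1:
--         return [ele if ele <= max else max for ele in Z]
--     mid = len(Z) // 2
--     left = modify_points(Z[:mid], max)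
--     right = modify_points(Z[mid:], left[-1])
--     return left + right
-- ===== Notes on version B (the rewrite author's own statement) =====
-- stated objective: alternative
-- what changed: Replaces the sequential clamp-and-update loop by a divide-and-conquer recursion: clamp the left half, then clamp the right half under the last clamped left value, and concatenate.
import Mathlib
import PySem

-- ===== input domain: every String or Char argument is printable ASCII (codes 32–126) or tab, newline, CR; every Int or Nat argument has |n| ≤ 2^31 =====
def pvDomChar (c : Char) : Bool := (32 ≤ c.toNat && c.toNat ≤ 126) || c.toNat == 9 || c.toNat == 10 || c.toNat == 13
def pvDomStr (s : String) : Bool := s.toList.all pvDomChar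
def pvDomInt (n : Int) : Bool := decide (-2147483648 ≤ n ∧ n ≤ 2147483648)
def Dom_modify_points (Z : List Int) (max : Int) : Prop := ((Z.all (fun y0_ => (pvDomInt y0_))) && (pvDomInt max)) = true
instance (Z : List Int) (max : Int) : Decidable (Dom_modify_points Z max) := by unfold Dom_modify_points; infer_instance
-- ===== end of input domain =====

-- B replaces the sequential clamp-and-update loop by a divide-and-conquer recursion
-- (clamp left half, then right half under the last clamped left value); alternative
-- decomposition, same results.

-- ===== PORT A =====
-- literal port of A's loop: state = (modified_Z, max)
def modify_points (Z : List Int) (max : Int) : List Int :=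
  (Z.foldl (fun (st : List Int × Int) ele =>
      if ele > st.2 then (st.1 ++ [st.2], st.2) else (st.1 ++ [ele], ele))
    (([] : List Int), max)).1

-- ===== PORT B =====
-- port of Source B's divide-and-conquer; Z[:mid] / Z[mid:] with 0 ≤ mid ≤ len are
-- exactly List.take / List.drop; left[-1] is PySem.List.pyGet? left (-1).
def modify_points_alt (Z : List Int) (max : Int) : List Int :=
  if Z.length ≤ 1 then
    Z.map (fun ele => if ele ≤ max then ele else max)
  else
    let mid := Z.length / 2
    let left := modify_points_alt (List.take mid Z) max
    match PySem.List.pyGet? left (-1) with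
    | some c => left ++ modify_points_alt (List.drop mid Z) c
    | none => []  -- unreachable: left is nonempty (mid ≥ 1)
  termination_by Z.length
  decreasing_by
  · simp only [List.length_take]; omega
  · simp only [List.length_drop]; omega

-- ===== PRECONDITION & SPEC =====
def Spec_modify_points (Z : List Int) (max : Int) (out : List Int) : Prop := out = modify_points_alt Z max
instance (Z : List Int) (max : Int) (out : List Int) : Decidable (Spec_modify_points Z max out) := by unfold Spec_modify_points; infer_instance

-- ===== CLAIM (what is proved, stated in full; the proofs are below) =====
def Claim_equal_modify_points : Prop := ∀ (Z : List Int) (max : Int), Dom_modify_points Z max → Spec_modify_points Z max (modify_points Z max)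

-- ===== LEMMAS AND PROOFS =====
-- common characterisation: the clamped list is the tail of a prefix-min scan
def pvOp (a b : Int) : Int := if a < b then a else b
def pvClamp (m : Int) (Z : List Int) : List Int := (List.scanl pvOp m Z).drop 1

theorem cons_tail_scanl (f : Int → Int → Int) (a : Int) (L : List Int) :
    a :: (List.scanl f a L).tail = List.scanl f a L := by
  cases L <;> simp [List.scanl_cons]

theorem pvClamp_cons (m x : Int) (T : List Int) :
    pvClamp m (x :: T) = pvOp m x :: pvClamp (pvOp m x) T := by
  simp only [pvClamp, List.scanl_cons, List.drop_succ_cons, List.drop_zero,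
    List.drop_one]
  exact (cons_tail_scanl pvOp (pvOp m x) T).symm

theorem pvClamp_append (m : Int) (X Y : List Int) :
    pvClamp m (X ++ Y) = pvClamp m X ++ pvClamp (X.foldl pvOp m) Y := by
  induction X generalizing m with
  | nil => simp [pvClamp]
  | cons x T ih => simp [pvClamp_cons, ih]

theorem pvClamp_getLast? (m : Int) (X : List Int) (h : X ≠ []) :
    (pvClamp m X).getLast? = some (X.foldl pvOp m) := by
  induction X generalizing m with
  | nil => simp at h
  | cons x T ih =>
    rcases T with _ | ⟨t, T⟩
    · simp [pvClamp]
    · rw [pvClamp_cons]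
      rw [pvClamp_cons, List.getLast?_cons_cons, ← pvClamp_cons]
      exact ih _ (by simp)

-- A's fold equals the scan characterisation
theorem modify_points_fold_eq (Z : List Int) (m : Int) (acc : List Int) :
    (Z.foldl (fun (st : List Int × Int) ele =>
        if ele > st.2 then (st.1 ++ [st.2], st.2) else (st.1 ++ [ele], ele))
      (acc, m)).1
    = acc ++ pvClamp m Z := by
  induction Z generalizing m acc with
  | nil => simp [pvClamp]
  | cons z T ih =>
    rw [pvClamp_cons]
    by_cases h : z > m
    · have hm : pvOp m z = m := by simp [pvOp, h]
      simp [h, ih, hm]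
    · have hm : pvOp m z = z := by
        have : ¬ m < z := by omega
        simp [pvOp, this]
      simp [h, ih, hm]

-- B's divide-and-conquer equals the scan characterisation
theorem modify_points_alt_eq (Z : List Int) (m : Int) :
    modify_points_alt Z m = pvClamp m Z := by
  induction hn : Z.length using Nat.strong_induction_on generalizing Z m with
  | _ n ih =>
    rw [modify_points_alt]
    by_cases h : Z.length ≤ 1
    · rcases Z with _ | ⟨z, _ | ⟨w, T⟩⟩
      · simp [pvClamp]
      · simp only [if_pos h, List.map]
        rw [pvClamp_cons]
        have : pvOp m z = if z ≤ m then z else m := by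
          unfold pvOp; split_ifs <;> omega
        simp [pvClamp, this]
      · simp at h
    · simp only [if_neg h]
      have hlen : 2 ≤ Z.length := by omega
      have hmid1 : 1 ≤ Z.length / 2 := by omega
      have hmidlt : Z.length / 2 < Z.length := by omega
      have htake : (List.take (Z.length / 2) Z).length = Z.length / 2 := by
        simp; omega
      have hdrop : (List.drop (Z.length / 2) Z).length = Z.length - Z.length / 2 := by
        simp
      have hL : modify_points_alt (List.take (Z.length / 2) Z) m
          = pvClamp m (List.take (Z.length / 2) Z) :=
        ih _ (by omega) _ _ htake
      have hne : List.take (Z.length / 2) Z ≠ [] := by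
        intro hc; rw [hc] at htake; simp at htake; omega
      have hlast := pvClamp_getLast? m (List.take (Z.length / 2) Z) hne
      rw [hL, PySem.List.pyGet?_neg_one, hlast]
      have hR : modify_points_alt (List.drop (Z.length / 2) Z)
            ((List.take (Z.length / 2) Z).foldl pvOp m)
          = pvClamp ((List.take (Z.length / 2) Z).foldl pvOp m)
              (List.drop (Z.length / 2) Z) :=
        ih _ (by omega) _ _ hdrop
      show pvClamp m (List.take (Z.length / 2) Z)
          ++ modify_points_alt (List.drop (Z.length / 2) Z)
               ((List.take (Z.length / 2) Z).foldl pvOp m) = pvClamp m Z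
      rw [hR, ← pvClamp_append, List.take_append_drop]

-- ===== VERDICT (by name: the statement is the Claim_ definition above) =====
theorem modify_points_spec : Claim_equal_modify_points := by
  intro Z max _
  unfold Spec_modify_points modify_points
  rw [modify_points_alt_eq]
  simpa using modify_points_fold_eq Z max []
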